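-- pv_equiv track=rewrite | github.com/dredivaris/pluggable_resume | wsgi/filters.py | level_to_proficiency
-- ===== SOURCE A (Python) =====
-- def level_to_proficiency(val):
--     val = int(val) if val is not None else 5
--     proficiency_dict = {
--         (10, 10): 'Guru',
--         (9, 9): 'Expert',
--         (8, 8): 'Pro',
--         (7, 6): 'Advanced',
--         (5, 5): 'Intermediate',
--         (4, 3): 'Skilled',
--         (2, 2): 'Beginner',
--         (1, 0): 'Novice'
--     }
--     for k, v in proficiency_dict.items():
--         high, low = k
--         if high >= val >= low:
--             return v
-- ===== SOURCE B (Python) =====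
-- _PROFICIENCY_TABLE = [
--     'Novice', 'Novice', 'Beginner', 'Skilled', 'Skilled', 'Intermediate',
--     'Advanced', 'Advanced', 'Pro', 'Expert', 'Guru'
-- ]
--
-- def level_to_proficiency(val):
--     val = int(val) if val is not None else 5
--     if 0 <= val <= 10:
--         return _PROFICIENCY_TABLE[val]
--     return None
-- ===== Notes on version B (the rewrite author's own statement) =====
-- stated objective: idiomatic
-- what changed: Replaces the loop over (high, low) range pairs with a precomputed length-11 lookup table indexed directly by the level, guarded by a single 0..10 bounds check.
import Mathlib
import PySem

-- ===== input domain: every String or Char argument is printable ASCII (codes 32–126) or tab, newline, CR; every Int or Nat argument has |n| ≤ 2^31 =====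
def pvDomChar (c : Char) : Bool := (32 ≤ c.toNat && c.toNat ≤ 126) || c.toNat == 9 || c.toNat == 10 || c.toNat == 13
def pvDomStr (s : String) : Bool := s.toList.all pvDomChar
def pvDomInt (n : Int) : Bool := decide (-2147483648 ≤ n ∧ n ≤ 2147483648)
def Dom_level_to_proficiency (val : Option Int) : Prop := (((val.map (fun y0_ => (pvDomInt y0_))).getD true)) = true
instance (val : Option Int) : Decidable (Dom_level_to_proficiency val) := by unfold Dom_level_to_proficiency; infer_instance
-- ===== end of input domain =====

-- B replaces A's scan over (high, low) range pairs with a direct table lookup; objective: idiomatic.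

-- ===== PORT A =====
-- A's dict of (high, low) range pairs, in insertion order.
def proficiencyPairs : List ((Int × Int) × String) :=
  [((10, 10), "Guru"), ((9, 9), "Expert"), ((8, 8), "Pro"), ((7, 6), "Advanced"),
   ((5, 5), "Intermediate"), ((4, 3), "Skilled"), ((2, 2), "Beginner"), ((1, 0), "Novice")]

-- the `for k, v in …: if high >= val >= low: return v` loop; falls through to None
def proficiencyScan (v : Int) : List ((Int × Int) × String) → Option String
  | [] => none
  | ((high, low), s) :: rest => if high ≥ v ∧ v ≥ low then some s else proficiencyScan v rest

def level_to_proficiency (val : Option Int) : Option String :=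
  let v : Int := match val with | some x => x | none => 5
  proficiencyScan v proficiencyPairs

-- ===== PORT B =====
def proficiencyTable : List String :=
  ["Novice", "Novice", "Beginner", "Skilled", "Skilled", "Intermediate",
   "Advanced", "Advanced", "Pro", "Expert", "Guru"]

def level_to_proficiency_alt (val : Option Int) : Option String :=
  let v : Int := match val with | some x => x | none => 5
  if 0 ≤ v ∧ v ≤ 10 then PySem.List.pyGet? proficiencyTable v else none

-- ===== PRECONDITION & SPEC =====
def Spec_level_to_proficiency (val : Option Int) (out : Option String) : Prop := out = level_to_proficiency_alt val
instance (val : Option Int) (out : Option String) : Decidable (Spec_level_to_proficiency val out) := by unfold Spec_level_to_proficiency; infer_instance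

-- ===== CLAIM (what is proved, stated in full; the proofs are below) =====
def Claim_equal_level_to_proficiency : Prop := ∀ (val : Option Int), Dom_level_to_proficiency val → Spec_level_to_proficiency val (level_to_proficiency val)

-- ===== LEMMAS AND PROOFS =====
-- the two programs agree for every integer level
lemma scan_eq_table (v : Int) :
    proficiencyScan v proficiencyPairs =
      (if 0 ≤ v ∧ v ≤ 10 then PySem.List.pyGet? proficiencyTable v else none) := by
  by_cases h0 : 0 ≤ v ∧ v ≤ 10
  · obtain ⟨h1, h2⟩ := h0
    interval_cases v <;> decide
  · simp only [if_neg h0]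
    simp only [proficiencyPairs, proficiencyScan]
    split_ifs <;> first | rfl | omega

-- ===== VERDICT (by name: the statement is the Claim_ definition above) =====
theorem level_to_proficiency_spec : Claim_equal_level_to_proficiency := by
  intro val _
  unfold Spec_level_to_proficiency level_to_proficiency level_to_proficiency_alt
  exact scan_eq_table _
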